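-- pv_equiv track=rewrite | github.com/imi4u36d/ai_cut | packages/ai/ai_cut_ai/text_generation.py | _script_output_token_candidates
-- ===== SOURCE A (Python) =====
-- def _script_output_token_candidates(configured_max_tokens: int) -> list[int]:
--     configured = max(512, int(configured_max_tokens or 0))
--     if configured >= 3_200:
--         return [configured]
--     candidates = [9_600, 8_000, 6_400, 4_800, 3_200, configured]
--     ordered: list[int] = []
--     seen: set[int] = set()
--     for item in candidates:
--         if item in seen:
--             continue
--         ordered.append(item)
--         seen.add(item)
--     return ordered
-- ===== SOURCE B (Python) =====
-- def _script_output_token_candidates(configured_max_tokens: int) -> list[int]: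
--     configured = max(512, int(configured_max_tokens or 0))
--     if configured >= 3_200:
--         return [configured]
--     # configured < 3200 here, so it can never collide with the fixed candidates:
--     # the deduplicated list is just the literal list with configured appended.
--     return [9_600, 8_000, 6_400, 4_800, 3_200, configured]
-- ===== Notes on version B (the rewrite author's own statement) =====
-- stated objective: simpler
-- what changed: B drops A's seen-set dedup loop entirely: after the early-return guard the clamped value is always below the smallest fixed candidate, so no duplicate can occur and B returns the literal candidate list directly.
import Mathlib
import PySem

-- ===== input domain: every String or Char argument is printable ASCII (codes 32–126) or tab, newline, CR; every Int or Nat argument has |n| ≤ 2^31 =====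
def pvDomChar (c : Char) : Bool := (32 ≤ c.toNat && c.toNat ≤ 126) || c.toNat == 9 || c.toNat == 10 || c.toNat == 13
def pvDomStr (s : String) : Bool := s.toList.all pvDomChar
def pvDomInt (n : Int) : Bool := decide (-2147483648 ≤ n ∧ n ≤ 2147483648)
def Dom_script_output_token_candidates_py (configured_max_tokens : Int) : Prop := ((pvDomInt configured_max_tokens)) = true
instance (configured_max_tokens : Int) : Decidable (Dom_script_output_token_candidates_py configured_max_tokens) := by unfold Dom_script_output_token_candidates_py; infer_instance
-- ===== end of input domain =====

-- ===== PORT A =====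
-- B: identical guard, then the literal candidate list directly (the dedup can never fire); objective: simpler.
def script_output_token_candidates_py (configured_max_tokens : Int) : List Int :=
  let configured : Int := max 512 (if configured_max_tokens = 0 then 0 else configured_max_tokens)
  if configured ≥ 3200 then [configured]
  else
    let candidates : List Int := [9600, 8000, 6400, 4800, 3200, configured]
    let st := candidates.foldl
      (fun (st : List Int × PySem.Set Int) item =>
        if PySem.Set.contains st.2 item then st
        else (st.1 ++ [item], PySem.Set.add st.2 item))
      ([], PySem.Set.empty)
    st.1

-- ===== PORT B =====
def script_output_token_candidates_py_alt (configured_max_tokens : Int) : List Int :=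
  let configured : Int := max 512 (if configured_max_tokens = 0 then 0 else configured_max_tokens)
  if configured ≥ 3200 then [configured]
  else [9600, 8000, 6400, 4800, 3200, configured]

-- ===== PRECONDITION & SPEC =====
def Spec_script_output_token_candidates_py (configured_max_tokens : Int) (out : List Int) : Prop := out = script_output_token_candidates_py_alt configured_max_tokens
instance (configured_max_tokens : Int) (out : List Int) : Decidable (Spec_script_output_token_candidates_py configured_max_tokens out) := by unfold Spec_script_output_token_candidates_py; infer_instance

-- ===== CLAIM (what is proved, stated in full; the proofs are below) =====
def Claim_equal_script_output_token_candidates_py : Prop := ∀ (configured_max_tokens : Int), Dom_script_output_token_candidates_py configured_max_tokens → Spec_script_output_token_candidates_py configured_max_tokens (script_output_token_candidates_py configured_max_tokens)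

-- ===== LEMMAS AND PROOFS =====

-- ===== VERDICT (by name: the statement is the Claim_ definition above) =====
theorem script_output_token_candidates_py_spec : Claim_equal_script_output_token_candidates_py := by
  intro c _
  unfold Spec_script_output_token_candidates_py script_output_token_candidates_py
    script_output_token_candidates_py_alt
  by_cases h : max 512 (if c = 0 then 0 else c) ≥ 3200
  · simp [h]
  · have hlt : max 512 (if c = 0 then 0 else c) < 3200 := by omega
    simp only [if_neg h]
    have h1 : max 512 (if c = 0 then 0 else c) ≠ 9600 := by omega
    have h2 : max 512 (if c = 0 then 0 else c) ≠ 8000 := by omega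
    have h3 : max 512 (if c = 0 then 0 else c) ≠ 6400 := by omega
    have h4 : max 512 (if c = 0 then 0 else c) ≠ 4800 := by omega
    have h5 : max 512 (if c = 0 then 0 else c) ≠ 3200 := by omega
    simp [List.foldl, PySem.Set.contains, PySem.Set.add, PySem.Set.empty, h1, h2, h3, h4, h5]
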